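-- pv_equiv track=rewrite | github.com/mmuranaka/HotelReviewClassifier | model.py | prepareSentence
-- ===== SOURCE A (Python) =====
-- replaceWithSpace = ['.', ',', '/', '!', '?', ';', ':','-', '_', '(', ')']
--
-- replaceWithNothing = ['\'']
--
-- def prepareSentence(clause):
--     lst = clause.lower()
--     for i in replaceWithSpace:
--         lst = lst.replace(i, ' ')
--     for i in replaceWithNothing:
--         lst = lst.replace(i, '')
--     lst = lst.split()
--     return lst
-- ===== SOURCE B (Python) =====
-- def prepareSentence(clause):
--     tokens = []
--     buf = []
--     for ch in clause.lower():
--         if ch.isspace() or ch in '.,/!?;:-_()':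
--             if buf:
--                 tokens.append(''.join(buf))
--                 buf = []
--         elif ch == "'":
--             pass
--         else:
--             buf.append(ch)
--     if buf:
--         tokens.append(''.join(buf))
--     return tokens
-- ===== Notes on version B (the rewrite author's own statement) =====
-- stated objective: alternative
-- what changed: Replaces the twelve whole-string replace passes plus a final split with a single character-by-character scan that builds tokens directly in one pass over the lowercased input; in CPython the C-level replace passes are faster, so no speed is claimed.
import Mathlib
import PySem

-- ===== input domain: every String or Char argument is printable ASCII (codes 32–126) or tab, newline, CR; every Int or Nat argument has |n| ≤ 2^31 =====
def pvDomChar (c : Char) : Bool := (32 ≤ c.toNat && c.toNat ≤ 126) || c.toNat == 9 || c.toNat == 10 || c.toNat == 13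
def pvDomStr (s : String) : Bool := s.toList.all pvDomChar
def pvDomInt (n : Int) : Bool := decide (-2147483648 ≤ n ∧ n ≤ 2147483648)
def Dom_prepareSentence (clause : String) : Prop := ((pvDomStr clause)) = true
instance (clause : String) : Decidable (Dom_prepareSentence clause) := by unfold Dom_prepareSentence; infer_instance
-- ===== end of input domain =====

set_option maxHeartbeats 1000000
set_option maxRecDepth 8000


-- B replaces A's twelve whole-string replace passes plus split() by a single character scan that builds tokens directly (objective: alternative; no speed claimed).

-- ===== PORT A =====
def replaceWithSpaceL : List String := [".", ",", "/", "!", "?", ";", ":", "-", "_", "(", ")"]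

def replaceWithNothingL : List String := ["'"]

def prepareSentence (clause : String) : List String :=
  let lst := PySem.Str.lower clause
  let lst := replaceWithSpaceL.foldl (fun s i => PySem.Str.replace s i " ") lst
  let lst := replaceWithNothingL.foldl (fun s i => PySem.Str.replace s i "") lst
  PySem.Str.split₀ lst

-- ===== PORT B =====
def pvIsDelim (c : Char) : Bool :=
  PySem.Chars.isspace c || ['.', ',', '/', '!', '?', ';', ':', '-', '_', '(', ')'].contains c

def pvScan : List Char → List Char → List String → List String
  | [], buf, toks => if buf.isEmpty then toks else toks ++ [String.ofList buf]
  | c :: t, buf, toks =>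
    if pvIsDelim c then pvScan t [] (if buf.isEmpty then toks else toks ++ [String.ofList buf])
    else if c = '\'' then pvScan t buf toks
    else pvScan t (buf ++ [c]) toks

def prepareSentence_alt (clause : String) : List String :=
  pvScan (PySem.Str.lower clause).toList [] []

-- ===== PRECONDITION & SPEC =====
def Spec_prepareSentence (clause : String) (out : List String) : Prop := out = prepareSentence_alt clause
instance (clause : String) (out : List String) : Decidable (Spec_prepareSentence clause out) := by unfold Spec_prepareSentence; infer_instance

-- ===== CLAIM (what is proved, stated in full; the proofs are below) =====
def Claim_equal_prepareSentence : Prop := ∀ (clause : String), Dom_prepareSentence clause → Spec_prepareSentence clause (prepareSentence clause)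

-- ===== LEMMAS AND PROOFS =====

def pvPunct : List Char := ['.', ',', '/', '!', '?', ';', ':', '-', '_', '(', ')']

def pvSpaceify (c : Char) : Char := if c ∈ pvPunct then ' ' else c

def pvTransform (l : List Char) : List Char :=
  (l.map pvSpaceify).filter (fun c => !(c == '\''))

-- single-char replace is a map
lemma replace_go_single (a b : Char) :
    ∀ (l : List Char) (acc : List Char) (fuel : Nat), l.length ≤ fuel →
      PySem.Chars.replace.go [a] [b] fuel l acc
        = acc.reverse ++ l.map (fun c => if c = a then b else c) := by
  intro l
  induction l with
  | nil =>
    intro acc fuel _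
    cases fuel <;> simp [PySem.Chars.replace.go]
  | cons c t ih =>
    intro acc fuel hf
    cases fuel with
    | zero => simp at hf
    | succ f =>
      by_cases h : c = a
      · subst h
        simp only [PySem.Chars.replace.go, List.isPrefixOf, BEq.rfl, Bool.and_self,
          List.isPrefixOf_nil_left, if_true, List.length_cons, List.drop_succ_cons,
          List.drop_zero, List.reverse_cons, List.reverse_nil, List.nil_append,
          List.length_nil, List.singleton_append]
        rw [ih (b :: acc) f (by simpa using hf)]
        simp
      · have hne : ([a].isPrefixOf (c :: t)) = false := by
          simp [List.isPrefixOf]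
          exact fun hh => h (by simpa [eq_comm] using hh)
        simp only [PySem.Chars.replace.go, hne, Bool.false_eq_true, if_false]
        rw [ih (c :: acc) f (by simpa using hf)]
        simp [h]

lemma replace_single_map (a b : Char) (l : List Char) :
    PySem.Chars.replace l [a] [b] = l.map (fun c => if c = a then b else c) := by
  simp only [PySem.Chars.replace, List.isEmpty_cons, Bool.false_eq_true, if_false]
  simpa using replace_go_single a b l [] l.length le_rfl

-- single-char delete is a filter
lemma replace_go_del (a : Char) :
    ∀ (l : List Char) (acc : List Char) (fuel : Nat), l.length ≤ fuel →
      PySem.Chars.replace.go [a] [] fuel l acc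
        = acc.reverse ++ l.filter (fun c => !(c == a)) := by
  intro l
  induction l with
  | nil =>
    intro acc fuel _
    cases fuel <;> simp [PySem.Chars.replace.go]
  | cons c t ih =>
    intro acc fuel hf
    cases fuel with
    | zero => simp at hf
    | succ f =>
      by_cases h : c = a
      · subst h
        simp only [PySem.Chars.replace.go, List.isPrefixOf, BEq.rfl, Bool.and_self,
          List.isPrefixOf_nil_left, if_true, List.length_cons, List.drop_succ_cons,
          List.drop_zero, List.reverse_nil, List.nil_append,
          List.length_nil]
        rw [ih acc f (by simpa using hf)]
        simp
      · have hne : ([a].isPrefixOf (c :: t)) = false := by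
          simp [List.isPrefixOf]
          exact fun hh => h (by simpa [eq_comm] using hh)
        simp only [PySem.Chars.replace.go, hne, Bool.false_eq_true, if_false]
        rw [ih (c :: acc) f (by simpa using hf)]
        simp [h]

lemma replace_single_del (a : Char) (l : List Char) :
    PySem.Chars.replace l [a] [] = l.filter (fun c => !(c == a)) := by
  simp only [PySem.Chars.replace, List.isEmpty_cons, Bool.false_eq_true, if_false]
  simpa using replace_go_del a l [] l.length le_rfl

-- A's chars after all replace passes = pvTransform
lemma a_chars (l : List Char) :
    PySem.Chars.replace
      (List.foldl (fun s i => PySem.Chars.replace s i [' '])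
        l (pvPunct.map (fun a => [a]))) ['\''] []
      = pvTransform l := by
  simp only [pvPunct, List.map, List.foldl, replace_single_map, replace_single_del,
    List.map_map, pvTransform]
  refine congrArg (List.filter (fun c => !(c == '\''))) ?_
  apply List.map_congr_left
  intro c _
  by_cases h : c ∈ pvPunct
  · fin_cases h <;> rfl
  · simp only [pvPunct, List.mem_cons, List.not_mem_nil, or_false] at h
    push_neg at h
    obtain ⟨h1, h2, h3, h4, h5, h6, h7, h8, h9, h10, h11⟩ := h
    simp [pvSpaceify, pvPunct, h1, h2, h3, h4, h5, h6, h7, h8, h9, h10, h11]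

-- split₀.go accumulates: factor the accumulator out
lemma split₀_go_acc :
    ∀ (l cur : List Char) (acc : List (List Char)),
      PySem.Chars.split₀.go l cur acc = acc.reverse ++ PySem.Chars.split₀.go l cur [] := by
  intro l
  induction l with
  | nil =>
    intro cur acc
    by_cases h : cur.isEmpty <;> simp [PySem.Chars.split₀.go, h]
  | cons c t ih =>
    intro cur acc
    by_cases hs : PySem.Chars.isspace c
    · by_cases h : cur.isEmpty
      · simp only [PySem.Chars.split₀.go, hs, h, if_true]
        exact ih [] acc
      · simp only [PySem.Chars.split₀.go, hs, h, Bool.false_eq_true, if_false, if_true]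
        rw [ih [] (cur.reverse :: acc), ih [] [cur.reverse]]
        simp
    · simp only [PySem.Chars.split₀.go, hs, Bool.false_eq_true, if_false]
      exact ih (c :: cur) acc

-- the scanner equals split₀ of the transformed characters
lemma scan_eq :
    ∀ (l buf : List Char) (toks : List String),
      pvScan l buf toks
        = toks ++ (PySem.Chars.split₀.go (pvTransform l) buf.reverse []).map String.ofList := by
  intro l
  induction l with
  | nil =>
    intro buf toks
    by_cases h : buf.isEmpty
    · simp [pvScan, pvTransform, PySem.Chars.split₀.go, h]
    · have h' : buf.reverse.isEmpty = false := by
        simp_all [List.isEmpty_iff]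
      simp [pvScan, pvTransform, PySem.Chars.split₀.go, h, h']
  | cons c t ih =>
    intro buf toks
    by_cases hd : pvIsDelim c
    · -- transform head is a whitespace char
      obtain ⟨d, hdd, hds⟩ : ∃ d, pvTransform (c :: t) = d :: pvTransform t ∧
          PySem.Chars.isspace d = true := by
        by_cases hp : c ∈ pvPunct
        · exact ⟨' ', by simp [pvTransform, pvSpaceify, hp], by decide⟩
        · have hs : PySem.Chars.isspace c = true := by
            simp only [pvIsDelim, Bool.or_eq_true, List.contains_eq_mem, decide_eq_true_eq] at hd
            rcases hd with hd | hd
            · exact hd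
            · exact absurd hd (by simpa [pvPunct] using hp)
          have hq : (c == '\'') = false := by
            have : c ≠ '\'' := by intro h; rw [h] at hs; exact absurd hs (by decide)
            simpa using this
          exact ⟨c, by simp [pvTransform, pvSpaceify, hp, hq], hs⟩
      rw [hdd]
      by_cases h : buf.isEmpty
      · have h' : buf = [] := by simpa [List.isEmpty_iff] using h
        subst h'
        simp only [pvScan, hd, if_true, List.isEmpty_nil]
        rw [ih [] toks]
        simp [PySem.Chars.split₀.go, hds]
      · have h' : buf.reverse.isEmpty = false := by simp_all [List.isEmpty_iff]
        simp only [pvScan, hd, if_true, h, Bool.false_eq_true, if_false]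
        rw [ih [] (toks ++ [String.ofList buf])]
        simp only [PySem.Chars.split₀.go, hds, h', Bool.false_eq_true, if_false, if_true]
        rw [split₀_go_acc (pvTransform t) [] [buf.reverse.reverse]]
        simp
    · by_cases hq : c = '\''
      · subst hq
        simp only [pvScan, hd, Bool.false_eq_true, if_false, if_true]
        rw [ih buf toks]
        simp [pvTransform, pvSpaceify, pvPunct]
      · have hp : c ∉ pvPunct := by
          intro hmem
          simp only [pvPunct, List.mem_cons, List.not_mem_nil, or_false] at hmem
          refine hd ?_
          simp [pvIsDelim, List.contains_eq_mem]
          exact Or.inr hmem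
        have hs : PySem.Chars.isspace c = false := by
          by_contra hh
          exact hd (by simp [pvIsDelim]; left; simpa using hh)
        have hq' : (c == '\'') = false := by simpa using hq
        simp only [pvScan, hd, hq, Bool.false_eq_true, if_false]
        rw [ih (buf ++ [c]) toks]
        simp [pvTransform, pvSpaceify, hp, hq', PySem.Chars.split₀.go, hs]

-- ===== VERDICT (by name: the statement is the Claim_ definition above) =====
theorem prepareSentence_spec : Claim_equal_prepareSentence := by
  intro clause _
  unfold Spec_prepareSentence prepareSentence prepareSentence_alt
  simp only [replaceWithSpaceL, replaceWithNothingL, List.foldl]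
  rw [scan_eq]
  have l1 : ("." : String).toList = ['.'] := by decide
  have l2 : ("," : String).toList = [','] := by decide
  have l3 : ("/" : String).toList = ['/'] := by decide
  have l4 : ("!" : String).toList = ['!'] := by decide
  have l5 : ("?" : String).toList = ['?'] := by decide
  have l6 : (";" : String).toList = [';'] := by decide
  have l7 : (":" : String).toList = [':'] := by decide
  have l8 : ("-" : String).toList = ['-'] := by decide
  have l9 : ("_" : String).toList = ['_'] := by decide
  have l10 : ("(" : String).toList = ['('] := by decide
  have l11 : (")" : String).toList = [')'] := by decide
  have l12 : ("'" : String).toList = ['\''] := by decide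
  have l13 : (" " : String).toList = [' '] := by decide
  have l14 : ("" : String).toList = [] := by decide
  have key := a_chars (PySem.Chars.lower clause.toList)
  simp only [pvPunct, List.map, List.foldl] at key
  simp [PySem.Str.split₀, PySem.Str.toList_replace, PySem.Str.toList_lower,
    l1, l2, l3, l4, l5, l6, l7, l8, l9, l10, l11, l12, l13, l14, key,
    PySem.Chars.split₀]
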